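-- pv_equiv track=rewrite | github.com/pretensor-ai/pretensor | src/pretensor/intelligence/metric_templates.py | _column_signals_metric
-- ===== SOURCE A (Python) =====
-- _METRIC_NAME_PARTS = frozenset(
--     {
--         "amount",
--         "total",
--         "price",
--         "cost",
--         "revenue",
--         "qty",
--         "quantity",
--         "count",
--         "fee",
--         "fees",
--         "tax",
--         "payment",
--         "payments",
--         "subtotal",
--         "discount",
--     }
-- )
--
-- def _column_signals_metric(column_name: str) -> bool:
--     base = column_name.lower().strip()
--     if not base:
--         return False
--     for part in _METRIC_NAME_PARTS:
--         if part in base: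
--             return True
--     return False
-- ===== SOURCE B (Python) =====
-- # Reduced substring-minimal keyword set (fees/payments/subtotal/discount each
-- # contain another keyword, so they are redundant for a substring test),
-- # dispatched by first character, scanned recursively over suffixes.
-- _BY_FIRST = {
--     "a": ("amount",),
--     "c": ("cost", "count"),
--     "f": ("fee",),
--     "p": ("price", "payment"),
--     "q": ("qty", "quantity"),
--     "r": ("revenue",),
--     "t": ("tax", "total"),
-- }
--
--
-- def _column_signals_metric(column_name: str) -> bool:
--     base = column_name.lower().strip()
--     while base:
--         for kw in _BY_FIRST.get(base[0], ()):
--             if base.startswith(kw):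
--                 return True
--         base = base[1:]
--     return False
-- ===== Notes on version B (the rewrite author's own statement) =====
-- stated objective: alternative
-- what changed: B shrinks the 15 keywords to the 11 substring-minimal ones (fees/payments/subtotal/discount each contain another keyword, so they are redundant), indexes them by first character, and scans the string once suffix-by-suffix with a first-character dispatch instead of A's 15 independent full substring searches.
import Mathlib
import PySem

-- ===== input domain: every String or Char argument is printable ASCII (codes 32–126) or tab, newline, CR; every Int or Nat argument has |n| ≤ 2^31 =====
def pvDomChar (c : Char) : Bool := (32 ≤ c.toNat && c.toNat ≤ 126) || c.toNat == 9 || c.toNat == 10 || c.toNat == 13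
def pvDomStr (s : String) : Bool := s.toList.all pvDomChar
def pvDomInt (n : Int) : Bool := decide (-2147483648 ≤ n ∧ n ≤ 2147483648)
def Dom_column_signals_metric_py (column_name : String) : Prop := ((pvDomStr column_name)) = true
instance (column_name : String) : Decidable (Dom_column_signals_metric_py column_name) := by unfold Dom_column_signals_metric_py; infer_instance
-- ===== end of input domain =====

-- B keeps only the 11 substring-minimal keywords (fees/payments/subtotal/discount each contain
-- another keyword), indexes them by first character, and scans the string suffix-by-suffix,
-- instead of A's 15 independent full substring searches (objective: alternative).

-- ===== PORT A =====
-- _METRIC_NAME_PARTS (any iteration order gives the same boolean)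
def pvMetricNameParts : List String :=
  ["amount", "total", "price", "cost", "revenue", "qty", "quantity", "count",
   "fee", "fees", "tax", "payment", "payments", "subtotal", "discount"]

def column_signals_metric_py (column_name : String) : Bool :=
  let base := PySem.Str.strip (PySem.Str.lower column_name)
  if base.toList = [] then false
  else pvMetricNameParts.any (fun part => PySem.Str.isIn part base)

-- ===== PORT B =====
-- _BY_FIRST.get(c, ()) : the substring-minimal keywords starting with c
def pvByFirst (c : Char) : List (List Char) :=
  if c = 'a' then [['a','m','o','u','n','t']]
  else if c = 'c' then [['c','o','s','t'], ['c','o','u','n','t']]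
  else if c = 'f' then [['f','e','e']]
  else if c = 'p' then [['p','r','i','c','e'], ['p','a','y','m','e','n','t']]
  else if c = 'q' then [['q','t','y'], ['q','u','a','n','t','i','t','y']]
  else if c = 'r' then [['r','e','v','e','n','u','e']]
  else if c = 't' then [['t','a','x'], ['t','o','t','a','l']]
  else []

-- the while-loop of B: try the keywords dispatched on the first character, else drop it
def pvSuffixScan : List Char → Bool
  | [] => false
  | c :: rest =>
      if (pvByFirst c).any (fun kw => PySem.Chars.startswith (c :: rest) kw) then true
      else pvSuffixScan rest

def column_signals_metric_py_alt (column_name : String) : Bool :=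
  pvSuffixScan (PySem.Str.strip (PySem.Str.lower column_name)).toList

-- ===== PRECONDITION & SPEC =====
def Spec_column_signals_metric_py (column_name : String) (out : Bool) : Prop := out = column_signals_metric_py_alt column_name
instance (column_name : String) (out : Bool) : Decidable (Spec_column_signals_metric_py column_name out) := by unfold Spec_column_signals_metric_py; infer_instance

-- ===== CLAIM (what is proved, stated in full; the proofs are below) =====
def Claim_equal_column_signals_metric_py : Prop := ∀ (column_name : String), Dom_column_signals_metric_py column_name → Spec_column_signals_metric_py column_name (column_signals_metric_py column_name)

-- ===== LEMMAS AND PROOFS =====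

-- the union of all dispatch lists, as plain keyword lists
def pvMinimalKws : List (List Char) :=
  [['a','m','o','u','n','t'], ['c','o','s','t'], ['c','o','u','n','t'], ['f','e','e'],
   ['p','r','i','c','e'], ['p','a','y','m','e','n','t'], ['q','t','y'],
   ['q','u','a','n','t','i','t','y'], ['r','e','v','e','n','u','e'],
   ['t','a','x'], ['t','o','t','a','l']]

lemma byFirst_subset (c : Char) (kw : List Char) (h : kw ∈ pvByFirst c) : kw ∈ pvMinimalKws := by
  unfold pvByFirst at h
  split_ifs at h <;> simp_all [pvMinimalKws] <;> tauto

lemma mem_byFirst_of_prefix (kw : List Char) (hkw : kw ∈ pvMinimalKws) (c : Char)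
    (rest : List Char) (h : kw <+: c :: rest) : kw ∈ pvByFirst c := by
  fin_cases hkw <;>
    (obtain ⟨rfl, -⟩ := List.cons_prefix_cons.mp h; decide)

lemma isIn_cons_iff (kw : List Char) (c : Char) (rest : List Char) :
    PySem.Chars.isIn kw (c :: rest) = true ↔ kw <+: c :: rest ∨ PySem.Chars.isIn kw rest = true := by
  rw [← PySem.Chars.exists_prefix_drop_iff_isIn, ← PySem.Chars.exists_prefix_drop_iff_isIn]
  constructor
  · rintro ⟨j, hj⟩
    cases j with
    | zero => exact Or.inl hj
    | succ j' => exact Or.inr ⟨j', hj⟩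
  · rintro (h | ⟨j, hj⟩)
    · exact ⟨0, h⟩
    · exact ⟨j + 1, hj⟩

-- the suffix scan finds exactly the minimal keywords occurring as substrings
lemma suffixScan_iff (s : List Char) :
    pvSuffixScan s = true ↔ ∃ kw ∈ pvMinimalKws, PySem.Chars.isIn kw s = true := by
  induction s with
  | nil =>
      simp only [pvSuffixScan]
      constructor
      · intro h; cases h
      · rintro ⟨kw, hkw, hin⟩
        have := (PySem.Chars.isIn_iff_infix _ _).mp hin
        have : kw = [] := List.sublist_nil.mp this.sublist
        subst this; revert hkw; decide
  | cons c rest ih =>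
      simp only [pvSuffixScan]
      by_cases hhead : (pvByFirst c).any (fun kw => PySem.Chars.startswith (c :: rest) kw) = true
      · simp only [hhead, if_true]
        constructor
        swap
        · intro _; trivial
        · intro _
          simp only [List.any_eq_true] at hhead
          obtain ⟨kw, hkw, hs⟩ := hhead
          refine ⟨kw, byFirst_subset c kw hkw, ?_⟩
          exact (isIn_cons_iff kw c rest).mpr (Or.inl ((PySem.Chars.startswith_iff _ _).mp hs))
      · simp [hhead]
        rw [ih]
        constructor
        · rintro ⟨kw, hkw, hin⟩
          exact ⟨kw, hkw, (isIn_cons_iff kw c rest).mpr (Or.inr hin)⟩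
        · rintro ⟨kw, hkw, hin⟩
          rcases (isIn_cons_iff kw c rest).mp hin with hpre | hin'
          · exfalso
            apply hhead
            simp only [List.any_eq_true]
            exact ⟨kw, mem_byFirst_of_prefix kw hkw c rest hpre,
                   (PySem.Chars.startswith_iff _ _).mpr hpre⟩
          · exact ⟨kw, hkw, hin'⟩

-- the 15 original parts and the 11 minimal keywords occur-as-substring equally
lemma parts_iff_minimal (s : List Char) :
    (∃ p ∈ pvMetricNameParts, PySem.Chars.isIn p.toList s = true) ↔
      (∃ kw ∈ pvMinimalKws, PySem.Chars.isIn kw s = true) := by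
  constructor
  · rintro ⟨p, hp, hin⟩
    rw [PySem.Chars.isIn_iff_infix] at hin
    -- each original part contains one of the minimal keywords as an infix
    have : ∃ kw ∈ pvMinimalKws, kw <:+: p.toList := by
      fin_cases hp <;> first
        | exact ⟨['a','m','o','u','n','t'], by decide, by decide⟩
        | exact ⟨['t','o','t','a','l'], by decide, by decide⟩
        | exact ⟨['p','r','i','c','e'], by decide, by decide⟩
        | exact ⟨['c','o','s','t'], by decide, by decide⟩
        | exact ⟨['r','e','v','e','n','u','e'], by decide, by decide⟩
        | exact ⟨['q','t','y'], by decide, by decide⟩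
        | exact ⟨['q','u','a','n','t','i','t','y'], by decide, by decide⟩
        | exact ⟨['c','o','u','n','t'], by decide, by decide⟩
        | exact ⟨['f','e','e'], by decide, by decide⟩
        | exact ⟨['t','a','x'], by decide, by decide⟩
        | exact ⟨['p','a','y','m','e','n','t'], by decide, by decide⟩
    obtain ⟨kw, hkw, hsub⟩ := this
    exact ⟨kw, hkw, (PySem.Chars.isIn_iff_infix _ _).mpr (hsub.trans hin)⟩
  · rintro ⟨kw, hkw, hin⟩
    -- each minimal keyword is itself one of the original parts
    have : ∃ p ∈ pvMetricNameParts, p.toList = kw := by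
      fin_cases hkw <;> first
        | exact ⟨"amount", by decide, by decide⟩
        | exact ⟨"cost", by decide, by decide⟩
        | exact ⟨"count", by decide, by decide⟩
        | exact ⟨"fee", by decide, by decide⟩
        | exact ⟨"price", by decide, by decide⟩
        | exact ⟨"payment", by decide, by decide⟩
        | exact ⟨"qty", by decide, by decide⟩
        | exact ⟨"quantity", by decide, by decide⟩
        | exact ⟨"revenue", by decide, by decide⟩
        | exact ⟨"tax", by decide, by decide⟩
        | exact ⟨"total", by decide, by decide⟩
    obtain ⟨p, hp, hpeq⟩ := this
    exact ⟨p, hp, by rw [hpeq]; exact hin⟩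

-- ===== VERDICT (by name: the statement is the Claim_ definition above) =====
theorem column_signals_metric_py_spec : Claim_equal_column_signals_metric_py := by
  intro column_name _
  unfold Spec_column_signals_metric_py column_signals_metric_py column_signals_metric_py_alt
  set base := PySem.Str.strip (PySem.Str.lower column_name) with hbase
  by_cases h : base.toList = []
  · rw [if_pos h, h]
    rfl
  · simp only [h, if_false]
    rw [Bool.eq_iff_iff]
    rw [suffixScan_iff]
    simp only [List.any_eq_true]
    rw [← parts_iff_minimal]
    constructor
    · rintro ⟨p, hp, hin⟩
      exact ⟨p, hp, by simpa using hin⟩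
    · rintro ⟨p, hp, hin⟩
      exact ⟨p, hp, by simpa using hin⟩
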